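-- pv_equiv track=rewrite | github.com/Jesssullivan/Ansible-DAG-Harness | harness/harness/db/state.py | _find_cycle_path
-- ===== SOURCE A (Python) =====
-- def _find_cycle_path(graph: dict[str, list[str]], cycle_nodes: list[str]) -> list[str]:
--     """
--     Find the actual path of a cycle using DFS.
--
--     Args:
--         graph: Adjacency list (to_role -> [from_role, ...])
--         cycle_nodes: Nodes known to be in a cycle
--
--     Returns:
--         List of node names forming a cycle path
--     """
--     # Build reverse graph for DFS from cycle nodes
--     reverse_graph: dict[str, list[str]] = {n: [] for n in cycle_nodes}
--     for to_role, from_roles in graph.items():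
--         if to_role in cycle_nodes:
--             for from_role in from_roles:
--                 if from_role in cycle_nodes:
--                     reverse_graph[from_role].append(to_role)
--
--     # DFS to find cycle
--     visited: set[str] = set()
--     rec_stack: set[str] = set()
--     path: list[str] = []
--
--     def dfs(node: str) -> bool:
--         visited.add(node)
--         rec_stack.add(node)
--         path.append(node)
--
--         for neighbor in reverse_graph.get(node, []):
--             if neighbor not in visited:
--                 if dfs(neighbor):
--                     return True
--             elif neighbor in rec_stack:
--                 # Found cycle - trim path to just the cycle
--                 cycle_start = path.index(neighbor)
--                 path.append(neighbor)  # Close the cycle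
--                 del path[:cycle_start]
--                 return True
--
--         path.pop()
--         rec_stack.remove(node)
--         return False
--
--     # Try DFS from each cycle node
--     for node in cycle_nodes:
--         if node not in visited:
--             if dfs(node):
--                 return path
--
--     # Fallback: just return the cycle nodes
--     return cycle_nodes + [cycle_nodes[0]] if cycle_nodes else []
-- ===== SOURCE B (Python) =====
-- def _find_cycle_path(graph: dict[str, list[str]], cycle_nodes: list[str]) -> list[str]:
--     """Iterative explicit-stack DFS (no recursion); same reverse graph, same cycle found."""
--     reverse_graph: dict[str, list[str]] = {n: [] for n in cycle_nodes}
--     for to_role, from_roles in graph.items():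
--         if to_role in cycle_nodes:
--             for from_role in from_roles:
--                 if from_role in cycle_nodes:
--                     reverse_graph[from_role].append(to_role)
--
--     visited: set[str] = set()
--     rec_stack: set[str] = set()
--     path: list[str] = []
--
--     for start in cycle_nodes:
--         if start in visited:
--             continue
--         visited.add(start)
--         rec_stack.add(start)
--         path.append(start)
--         stack: list[tuple[str, list[str]]] = [(start, reverse_graph.get(start, []))]
--         while stack:
--             node, remaining = stack[-1]
--             if remaining:
--                 nb = remaining[0]
--                 stack[-1] = (node, remaining[1:])
--                 if nb not in visited:
--                     visited.add(nb)
--                     rec_stack.add(nb)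
--                     path.append(nb)
--                     stack.append((nb, reverse_graph.get(nb, [])))
--                 elif nb in rec_stack:
--                     cycle_start = path.index(nb)
--                     path.append(nb)
--                     del path[:cycle_start]
--                     return path
--             else:
--                 stack.pop()
--                 path.pop()
--                 rec_stack.remove(node)
--
--     return cycle_nodes + [cycle_nodes[0]] if cycle_nodes else []
-- ===== Notes on version B (the rewrite author's own statement) =====
-- stated objective: alternative
-- what changed: The recursive DFS (nested dfs closure, call stack) is replaced by an iterative DFS driven by an explicit stack of (node, remaining-neighbors) frames that visits neighbors in the same order and backtracks at the same moments, so the identical cycle path is found without recursion.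
import Mathlib
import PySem

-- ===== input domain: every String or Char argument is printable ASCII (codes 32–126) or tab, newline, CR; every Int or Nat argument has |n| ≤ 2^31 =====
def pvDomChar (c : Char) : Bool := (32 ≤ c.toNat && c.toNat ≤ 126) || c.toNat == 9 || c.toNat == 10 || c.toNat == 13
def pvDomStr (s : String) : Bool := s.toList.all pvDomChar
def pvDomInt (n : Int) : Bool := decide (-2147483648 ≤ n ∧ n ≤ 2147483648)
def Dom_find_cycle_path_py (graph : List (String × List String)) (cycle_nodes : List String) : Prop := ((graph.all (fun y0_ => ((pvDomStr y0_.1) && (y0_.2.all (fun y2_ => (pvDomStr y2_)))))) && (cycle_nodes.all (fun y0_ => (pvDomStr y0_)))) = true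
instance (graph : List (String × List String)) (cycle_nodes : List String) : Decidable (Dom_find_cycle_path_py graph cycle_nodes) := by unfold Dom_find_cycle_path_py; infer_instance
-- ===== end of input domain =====

-- B replaces A's recursive DFS by an explicit-stack iterative DFS with the same neighbor order
-- and backtracking moments; the equivalence below is about the return value (neither mutates its inputs).

-- Shared by both ports (both Pythons build the identical reverse graph and fallback):
-- reverse_graph = {n: [] for n in cycle_nodes}; then append to_role to reverse_graph[from_role] ...
def pvBuildRG (graph : List (String × List String)) (cycle_nodes : List String) :
    PySem.Dict String (List String) :=
  let d0 := cycle_nodes.foldl (fun d n => d.insert n []) PySem.Dict.empty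
  graph.foldl (fun d p =>
    if cycle_nodes.contains p.1 then
      p.2.foldl (fun d f =>
        if cycle_nodes.contains f then d.modify f [] (fun l => l ++ [p.1]) else d) d
    else d) d0

-- cycle_nodes + [cycle_nodes[0]] if cycle_nodes else []
def pvFallback (cycle_nodes : List String) : List String :=
  match cycle_nodes with
  | [] => []
  | h :: _ => cycle_nodes ++ [h]

-- Fuel bound (port artifact: Python's loops/recursion have no fuel; this bound is never
-- reached — each DFS visit costs at most (neighbors+2) ≤ S steps and there are ≤ S visits).
def pvFuel (rg : PySem.Dict String (List String)) (cycle_nodes : List String) : Nat :=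
  let S := cycle_nodes.length + ((rg.values.map List.length).sum) + 2
  S * S + 2

-- Result of one DFS traversal: a found cycle path, or the updated (fuel, visited, rec_stack, path).
inductive PvRes where
  | found : List String → PvRes
  | done : Nat → PySem.Set String → PySem.Set String → List String → PvRes
  | out : PvRes
deriving Repr, DecidableEq

-- ===== PORT A =====
-- the 'for neighbor in reverse_graph.get(node, [])' loop of A's recursive dfs, with the
-- recursive dfs(neighbor) call inlined as the unvisited branch (mark, then loop over its
-- neighbors); 'done' carries the remaining fuel (min f' f = f' always, see pvGoA_fuel_le;
-- 'min' only justifies termination).  path.pop() = dropLast (path is nonempty there);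
-- rec_stack.remove(node) = discard (node is always a member); the index? none case is
-- unreachable (neighbor ∈ rec_stack ⊆ path).
def pvGoA (rg : PySem.Dict String (List String)) (fuel : Nat) (node : String)
    (ns : List String) (vis rec : PySem.Set String) (path : List String) : PvRes :=
  match fuel, ns with
  | 0, _ => .out
  | f + 1, [] => .done f vis (PySem.Set.discard rec node) path.dropLast
  | f + 1, nb :: ns' =>
    if !(PySem.Set.contains vis nb) then
      match pvGoA rg f nb (rg.getD nb []) (PySem.Set.add vis nb) (PySem.Set.add rec nb)
          (path ++ [nb]) with
      | .found p => .found p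
      | .done f' v' r' p' => pvGoA rg (min f' f) node ns' v' r' p'
      | .out => .out
    else if PySem.Set.contains rec nb then
      match PySem.List.index? path nb with
      | some i => .found ((path ++ [nb]).drop i)
      | none => .out
    else pvGoA rg f node ns' vis rec path
termination_by (fuel, 0)
decreasing_by
  · exact Prod.Lex.left _ _ (Nat.lt_succ_self f)
  · exact Prod.Lex.left _ _ (Nat.lt_succ_of_le (Nat.min_le_right f' f))
  · exact Prod.Lex.left _ _ (Nat.lt_succ_self f)

-- dfs(node): mark node (visited, rec_stack, path), then walk its neighbors
def pvDfsA (rg : PySem.Dict String (List String)) (fuel : Nat) (node : String)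
    (vis rec : PySem.Set String) (path : List String) : PvRes :=
  match fuel with
  | 0 => .out
  | f + 1 =>
    pvGoA rg f node (rg.getD node []) (PySem.Set.add vis node) (PySem.Set.add rec node)
      (path ++ [node])

-- for node in cycle_nodes: if node not in visited: if dfs(node): return path
def pvOuterA (rg : PySem.Dict String (List String)) (fuel0 : Nat) :
    List String → PySem.Set String → PySem.Set String → List String → Option (List String)
  | [], _, _, _ => none
  | node :: rest, vis, rec, path =>
    if PySem.Set.contains vis node then pvOuterA rg fuel0 rest vis rec path
    else
      match pvDfsA rg fuel0 node vis rec path with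
      | .found p => some p
      | .done _ v' r' p' => pvOuterA rg fuel0 rest v' r' p'
      | .out => none

def find_cycle_path_py (graph : List (String × List String)) (cycle_nodes : List String) :
    List String :=
  let rg := pvBuildRG graph cycle_nodes
  match pvOuterA rg (pvFuel rg cycle_nodes) cycle_nodes PySem.Set.empty PySem.Set.empty [] with
  | some p => p
  | none => pvFallback cycle_nodes

-- ===== PORT B =====
-- B's while loop over the explicit stack of (node, remaining-neighbors) frames; one fuel
-- unit per loop iteration (same port artifact as in A; never exhausted on real runs).
def pvMachineB (rg : PySem.Dict String (List String)) (fuel : Nat)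
    (stack : List (String × List String)) (vis rec : PySem.Set String)
    (path : List String) : PvRes :=
  match fuel, stack with
  | f, [] => .done f vis rec path
  | 0, _ :: _ => .out
  | f + 1, (node, remaining) :: rest =>
    match remaining with
    | nb :: ns' =>
      if !(PySem.Set.contains vis nb) then
        pvMachineB rg f ((nb, rg.getD nb []) :: (node, ns') :: rest)
          (PySem.Set.add vis nb) (PySem.Set.add rec nb) (path ++ [nb])
      else if PySem.Set.contains rec nb then
        match PySem.List.index? path nb with
        | some i => .found ((path ++ [nb]).drop i)
        | none => .out
      else pvMachineB rg f ((node, ns') :: rest) vis rec path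
    | [] => pvMachineB rg f rest vis (PySem.Set.discard rec node) path.dropLast

-- for start in cycle_nodes: if unvisited: mark start, push its frame, run the while loop
def pvOuterB (rg : PySem.Dict String (List String)) (fuel0 : Nat) :
    List String → PySem.Set String → PySem.Set String → List String → Option (List String)
  | [], _, _, _ => none
  | node :: rest, vis, rec, path =>
    if PySem.Set.contains vis node then pvOuterB rg fuel0 rest vis rec path
    else
      match (match fuel0 with
             | 0 => PvRes.out
             | f + 1 =>
               pvMachineB rg f [(node, rg.getD node [])] (PySem.Set.add vis node)
                 (PySem.Set.add rec node) (path ++ [node])) with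
      | .found p => some p
      | .done _ v' r' p' => pvOuterB rg fuel0 rest v' r' p'
      | .out => none

def find_cycle_path_py_alt (graph : List (String × List String)) (cycle_nodes : List String) :
    List String :=
  let rg := pvBuildRG graph cycle_nodes
  match pvOuterB rg (pvFuel rg cycle_nodes) cycle_nodes PySem.Set.empty PySem.Set.empty [] with
  | some p => p
  | none => pvFallback cycle_nodes

-- ===== PRECONDITION & SPEC =====
def Spec_find_cycle_path_py (graph : List (String × List String)) (cycle_nodes : List String) (out : List String) : Prop := out = find_cycle_path_py_alt graph cycle_nodes
instance (graph : List (String × List String)) (cycle_nodes : List String) (out : List String) : Decidable (Spec_find_cycle_path_py graph cycle_nodes out) := by unfold Spec_find_cycle_path_py; infer_instance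

-- ===== CLAIM (what is proved, stated in full; the proofs are below) =====
def Claim_equal_find_cycle_path_py : Prop := ∀ (graph : List (String × List String)) (cycle_nodes : List String), Dom_find_cycle_path_py graph cycle_nodes → Spec_find_cycle_path_py graph cycle_nodes (find_cycle_path_py graph cycle_nodes)

-- ===== LEMMAS AND PROOFS =====

theorem pvMachineB_nil (rg : PySem.Dict String (List String)) (f : Nat)
    (vis rec : PySem.Set String) (path : List String) :
    pvMachineB rg f [] vis rec path = .done f vis rec path := by
  cases f <;> rfl

-- the fuel returned by a traversal never exceeds the fuel it was given
theorem pvGoA_fuel_le (rg : PySem.Dict String (List String)) :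
    ∀ (fuel : Nat) (node : String) (ns : List String) (vis rec : PySem.Set String)
      (path : List String) (f' : Nat) (v' r' : PySem.Set String) (p' : List String),
      pvGoA rg fuel node ns vis rec path = .done f' v' r' p' → f' ≤ fuel := by
  intro fuel
  induction fuel using Nat.strong_induction_on with
  | _ fuel ih =>
    intro node ns vis rec path f' v' r' p' h
    match fuel, ns with
    | 0, _ => simp [pvGoA] at h
    | f + 1, [] =>
      rw [pvGoA] at h
      cases h
      omega
    | f + 1, nb :: ns' =>
      rw [pvGoA] at h
      split at h
      · cases hg : pvGoA rg f nb (rg.getD nb []) (PySem.Set.add vis nb) (PySem.Set.add rec nb) (path ++ [nb]) with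
        | found q => rw [hg] at h; cases h
        | out => rw [hg] at h; cases h
        | done f1 v1 r1 p1 =>
          rw [hg] at h
          simp only at h
          have := ih (min f1 f) (by omega) node ns' v1 r1 p1 f' v' r' p' h
          omega
      · split at h
        · cases hi : PySem.List.index? path nb <;> rw [hi] at h <;> cases h
        · have := ih f (by omega) node ns' vis rec path f' v' r' p' h
          omega

-- lockstep: running B's machine with a top frame (node, ns) behaves as A's neighbor loop
-- for that frame followed by the machine on the remaining frames
theorem pvMachine_goA (rg : PySem.Dict String (List String)) :
    ∀ (fuel : Nat) (node : String) (ns : List String)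
      (rest : List (String × List String)) (vis rec : PySem.Set String) (path : List String),
      pvMachineB rg fuel ((node, ns) :: rest) vis rec path =
        (match pvGoA rg fuel node ns vis rec path with
         | .found q => .found q
         | .done f' v' r' p' => pvMachineB rg f' rest v' r' p'
         | .out => .out) := by
  intro fuel
  induction fuel using Nat.strong_induction_on with
  | _ fuel ih =>
    intro node ns rest vis rec path
    match fuel, ns with
    | 0, _ => rw [pvMachineB]; simp [pvGoA]
    | f + 1, [] => rw [pvMachineB, pvGoA]
    | f + 1, nb :: ns' =>
      rw [pvMachineB, pvGoA]
      by_cases hv : (!(PySem.Set.contains vis nb)) = true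
      · rw [if_pos hv, if_pos hv]
        rw [ih f (by omega)]
        cases hg : pvGoA rg f nb (rg.getD nb []) (PySem.Set.add vis nb) (PySem.Set.add rec nb) (path ++ [nb]) with
        | found q => rfl
        | out => rfl
        | done f1 v1 r1 p1 =>
          have hf1 : f1 ≤ f := pvGoA_fuel_le rg f nb (rg.getD nb []) _ _ _ f1 v1 r1 p1 hg
          simp only [Nat.min_eq_left hf1]
          rw [ih f1 (by omega)]
      · rw [if_neg hv, if_neg hv]
        by_cases hr : PySem.Set.contains rec nb
        · rw [if_pos hr, if_pos hr]
          cases hi : PySem.List.index? path nb <;> rfl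
        · rw [if_neg hr, if_neg hr]
          exact ih f (by omega) node ns' rest vis rec path

theorem pvOuter_eq (rg : PySem.Dict String (List String)) (fuel0 : Nat) :
    ∀ (nodes : List String) (vis rec : PySem.Set String) (path : List String),
      pvOuterA rg fuel0 nodes vis rec path = pvOuterB rg fuel0 nodes vis rec path := by
  intro nodes
  induction nodes with
  | nil => intro vis rec path; rw [pvOuterA, pvOuterB.eq_def]
  | cons node rest ih =>
    intro vis rec path
    rw [pvOuterA, pvOuterB.eq_def]
    simp only
    by_cases hv : PySem.Set.contains vis node
    · rw [if_pos hv, if_pos hv]; exact ih vis rec path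
    · rw [if_neg hv, if_neg hv]
      unfold pvDfsA
      match fuel0 with
      | 0 => rfl
      | f + 1 =>
        simp only
        rw [pvMachine_goA]
        cases hg : pvGoA rg f node (rg.getD node []) (PySem.Set.add vis node) (PySem.Set.add rec node) (path ++ [node]) with
        | found q => rfl
        | out => rfl
        | done f1 v1 r1 p1 => simp only [pvMachineB_nil]; exact ih v1 r1 p1

-- ===== VERDICT (by name: the statement is the Claim_ definition above) =====
theorem find_cycle_path_py_spec : Claim_equal_find_cycle_path_py := by
  intro graph cycle_nodes _
  unfold Spec_find_cycle_path_py find_cycle_path_py find_cycle_path_py_alt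
  simp only [pvOuter_eq]
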